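-- pv_equiv track=rewrite | github.com/gprashant-src/dsa-cookbook | main.py | find
-- ===== SOURCE A (Python) =====
-- f = lambda x, p: (x ** 3 - 3 * x + 4) % p
--
-- def find(p):
--     A = 1
--     for x in range(p):
--         A = (A * f(x, p)) % p
--         if A == 0:
--             return 0, x
--     else:
--         return A, p
-- ===== SOURCE B (Python) =====
-- def _gcd(a, b):
--     while b > 0:
--         a, b = b, a % b
--     return a
--
-- def find(p):
--     # Phase 1: divisibility tracking. m is the part of p that the running
--     # product has not yet covered (m = p // gcd(prefix_product, p)); the
--     # prefix product is 0 mod p exactly when m reaches 1. No products needed.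
--     m = p
--     for x in range(p):
--         m //= _gcd(m, (x ** 3 - 3 * x + 4) % p)
--         if m == 1:
--             return 0, x
--     # Phase 2: no prefix is divisible by p, so compute the product outright.
--     A = 1
--     for x in range(p):
--         A = A * ((x ** 3 - 3 * x + 4) % p) % p
--     return A, p
-- ===== Notes on version B (the rewrite author's own statement) =====
-- stated objective: alternative
-- what changed: B never multiplies during its search phase: it tracks the still-uncovered divisor m = p // gcd(prefix product, p) via repeated gcd updates, returning at the first index where m becomes trivial (exactly where A's running product vanishes mod p); only when no such index exists does a separate plain product pass compute the final value.
import Mathlib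
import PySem

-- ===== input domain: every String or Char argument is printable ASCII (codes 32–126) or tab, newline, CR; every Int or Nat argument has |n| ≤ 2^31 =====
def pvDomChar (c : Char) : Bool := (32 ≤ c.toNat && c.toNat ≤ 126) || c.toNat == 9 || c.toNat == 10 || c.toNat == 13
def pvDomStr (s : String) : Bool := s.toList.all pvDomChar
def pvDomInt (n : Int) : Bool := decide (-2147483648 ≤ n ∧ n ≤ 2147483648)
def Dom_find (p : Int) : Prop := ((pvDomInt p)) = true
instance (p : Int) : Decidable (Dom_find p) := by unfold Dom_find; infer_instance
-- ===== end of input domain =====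

-- B replaces A's modular-product scan by gcd-based divisibility tracking: phase 1 finds the
-- first index where p divides the prefix product without computing any product; phase 2
-- computes the product only when no prefix is divisible — an alternative algorithm.

-- ===== PORT A =====
-- the for-loop of A: threads the running product, early-returns (0, x) at the first zero
def findLoop : List Int → Int → Int → Int × Int
  | [], acc, p => (acc, p)
  | x :: xs, acc, p =>
    let a := PySem.Int.mod (acc * PySem.Int.mod (x ^ 3 - 3 * x + 4) p) p
    if a = 0 then (0, x) else findLoop xs a p

def find (p : Int) : Int × Int := findLoop (PySem.List.pyRange 0 p 1) 1 p

-- ===== PORT B =====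
-- Source B's '_gcd': Euclid's loop 'while b > 0: a, b = b, a % b'
def gcdLoop (a b : Int) : Int :=
  if h : 0 < b then gcdLoop b (PySem.Int.mod a b) else a
termination_by b.toNat
decreasing_by
  have h1 : PySem.Int.mod a b = a % b := by
    simp [PySem.Int.mod, Int.fmod_eq_emod, le_of_lt h]
  have h3 : a % b < b := Int.emod_lt_of_pos a h
  rw [h1]; omega

-- phase 1 of Source B: m //= _gcd(m, f(x) % p); first x with m == 1
def phase1 : List Int → Int → Int → Option Int
  | [], _, _ => none
  | x :: xs, m, p =>
    let m' := PySem.Int.floordiv m (gcdLoop m (PySem.Int.mod (x ^ 3 - 3 * x + 4) p))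
    if m' = 1 then some x else phase1 xs m' p

-- phase 2 of Source B: the plain cumulative product mod p, no early exit
def phase2 : List Int → Int → Int → Int
  | [], acc, _ => acc
  | x :: xs, acc, p =>
    phase2 xs (PySem.Int.mod (acc * PySem.Int.mod (x ^ 3 - 3 * x + 4) p) p) p

def find_alt (p : Int) : Int × Int :=
  match phase1 (PySem.List.pyRange 0 p 1) p p with
  | some x => (0, x)
  | none => (phase2 (PySem.List.pyRange 0 p 1) 1 p, p)

-- ===== PRECONDITION & SPEC =====
def Spec_find (p : Int) (out : Int × Int) : Prop := out = find_alt p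
instance (p : Int) (out : Int × Int) : Decidable (Spec_find p out) := by unfold Spec_find; infer_instance

-- ===== CLAIM (what is proved, stated in full; the proofs are below) =====
def Claim_equal_find : Prop := ∀ (p : Int), Dom_find p → Spec_find p (find p)

-- ===== LEMMAS AND PROOFS =====

-- Python's % is fmod; for a positive modulus it is Lean's emod
lemma pmod_eq (a p : Int) (hp : 0 < p) : PySem.Int.mod a p = a % p := by
  simp [PySem.Int.mod, Int.fmod_eq_emod, le_of_lt hp]

-- Euclid's loop computes the gcd (on nonnegative arguments)
lemma gcdLoop_eq : ∀ (n : Nat) (a b : Int), b.toNat = n → 0 ≤ a → 0 ≤ b →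
    gcdLoop a b = (Int.gcd a b : Int) := by
  intro n
  induction n using Nat.strong_induction_on with
  | _ n ihn =>
    intro a b hn ha hb
    rw [gcdLoop]
    by_cases h : 0 < b
    · rw [dif_pos h, pmod_eq a b h]
      have h2 : 0 ≤ a % b := Int.emod_nonneg a (by omega)
      have h3 : a % b < b := Int.emod_lt_of_pos a h
      rw [ihn (a % b).toNat (by omega) b (a % b) rfl (le_of_lt h) h2]
      -- gcd b (a % b) = gcd a b, via the Nat recursion of gcd
      obtain ⟨a', rfl⟩ : ∃ a' : Nat, (a' : Int) = a := ⟨a.toNat, Int.toNat_of_nonneg ha⟩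
      obtain ⟨b', rfl⟩ : ∃ b' : Nat, (b' : Int) = b := ⟨b.toNat, Int.toNat_of_nonneg hb⟩
      rw [← Int.natCast_mod, Int.gcd_natCast_natCast, Int.gcd_natCast_natCast]
      rw [Nat.gcd_comm b' (a' % b'), ← Nat.gcd_rec b' a', Nat.gcd_comm b' a']
    · rw [dif_neg h]
      have hb0 : b = 0 := by omega
      subst hb0
      simp [Int.gcd, Int.natAbs_of_nonneg ha]

-- the key arithmetic fact behind phase 1: dividing the still-uncovered part m = n / gcd(a, n)
-- by gcd(m, b) gives exactly the part of n not covered by the product a * b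
lemma nat_key (a b n : Nat) (hn : 0 < n) :
    (n / a.gcd n) / ((n / a.gcd n).gcd b) = n / ((a * b).gcd n) := by
  set g := a.gcd n with hg
  have hgpos : 0 < g := Nat.gcd_pos_of_pos_right a hn
  have hgdvd : g ∣ n := Nat.gcd_dvd_right a n
  have hadvd : g ∣ a := Nat.gcd_dvd_left a n
  obtain ⟨n₁, hn₁⟩ := hgdvd
  obtain ⟨a₁, ha₁⟩ := hadvd
  have hcop : a₁.Coprime n₁ := by
    have := Nat.coprime_div_gcd_div_gcd (m := a) (n := n) (by rw [← hg]; exact hgpos)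
    rwa [← hg, ha₁, hn₁, Nat.mul_div_cancel_left a₁ hgpos,
      Nat.mul_div_cancel_left n₁ hgpos] at this
  have hmain : (a * b).gcd n = g * (b.gcd n₁) := by
    rw [ha₁, hn₁, mul_assoc, Nat.gcd_mul_left, hcop.gcd_mul_left_cancel b]
  rw [hmain, hn₁, Nat.mul_div_cancel_left n₁ hgpos, Nat.mul_div_mul_left _ _ hgpos,
    Nat.gcd_comm n₁ b]

-- m hits 1 exactly when n divides the accumulated product
lemma div_gcd_eq_one_iff (c n : Nat) (hn : 0 < n) : n / c.gcd n = 1 ↔ n ∣ c := by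
  have hd : c.gcd n ∣ n := Nat.gcd_dvd_right c n
  have hgpos : 0 < c.gcd n := Nat.gcd_pos_of_pos_right c hn
  constructor
  · intro h1
    have h2 : n / c.gcd n * c.gcd n = n := Nat.div_mul_cancel hd
    rw [h1, one_mul] at h2
    exact h2 ▸ Nat.gcd_dvd_left c n
  · intro hdvd
    rw [Nat.gcd_eq_right hdvd]
    exact Nat.div_self hn

-- the two loops in lock-step: A's acc is the prefix product P mod p, B's m is p / gcd(P, p)
lemma joint : ∀ (xs : List Int) (acc P p : Int), 0 < p → 0 ≤ P →
    PySem.Int.mod acc p = PySem.Int.mod P p →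
    findLoop xs acc p =
      (match phase1 xs (p / (Int.gcd P p : Int)) p with
       | some x => (0, x)
       | none => (phase2 xs acc p, p)) := by
  intro xs
  induction xs with
  | nil => intro acc P p hp hP hm; simp [findLoop, phase1, phase2]
  | cons x xs ih =>
    intro acc P p hp hP hm
    obtain ⟨n, rfl⟩ : ∃ n : Nat, (n : Int) = p := ⟨p.toNat, Int.toNat_of_nonneg (by omega)⟩
    obtain ⟨a, rfl⟩ : ∃ a : Nat, (a : Int) = P := ⟨P.toNat, Int.toNat_of_nonneg hP⟩
    have hnpos : 0 < n := by exact_mod_cast hp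
    -- the common factor f(x) % p, a nonnegative integer b < n
    have hv : PySem.Int.mod (x ^ 3 - 3 * x + 4) n = (x ^ 3 - 3 * x + 4) % n := pmod_eq _ _ hp
    obtain ⟨b, hb⟩ : ∃ b : Nat, (b : Int) = (x ^ 3 - 3 * x + 4) % n :=
      ⟨((x ^ 3 - 3 * x + 4) % n).toNat,
        Int.toNat_of_nonneg (Int.emod_nonneg _ (by omega))⟩
    -- A's new accumulator equals (a * b) % n
    have hacc : PySem.Int.mod (acc * PySem.Int.mod (x ^ 3 - 3 * x + 4) (n : Int)) n =
        ((a * b : Nat) : Int) % n := by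
      rw [hv, ← hb, pmod_eq _ _ hp]
      rw [pmod_eq _ _ hp, pmod_eq _ _ hp] at hm
      conv_lhs => rw [Int.mul_emod, hm, ← Int.mul_emod]
      norm_cast
    -- B's m and its update
    have hmval : ((n : Int) / (Int.gcd (a : Int) (n : Int) : Int)) = ((n / a.gcd n : Nat) : Int) := by
      rw [Int.gcd_natCast_natCast, Int.natCast_div]
    have hgl : gcdLoop ((n / a.gcd n : Nat) : Int) ((b : Nat) : Int) =
        (Int.gcd ((n / a.gcd n : Nat) : Int) ((b : Nat) : Int) : Int) :=
      gcdLoop_eq _ _ _ rfl (by positivity) (by positivity)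
    have hmupd : PySem.Int.floordiv ((n / a.gcd n : Nat) : Int)
        (gcdLoop ((n / a.gcd n : Nat) : Int) ((b : Nat) : Int)) =
        ((n / (a * b).gcd n : Nat) : Int) := by
      rw [hgl, Int.gcd_natCast_natCast]
      have : PySem.Int.floordiv ((n / a.gcd n : Nat) : Int) (((n / a.gcd n).gcd b : Nat) : Int) =
          ((n / a.gcd n : Nat) : Int) / (((n / a.gcd n).gcd b : Nat) : Int) := by
        simp [PySem.Int.floordiv, Int.fdiv_eq_ediv]
      rw [this, ← Int.natCast_div, nat_key a b n hnpos]
    -- zero test on A's side ↔ m' = 1 on B's side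
    have hiff : (((a * b : Nat) : Int) % n = 0) ↔ ((n / (a * b).gcd n : Nat) : Int) = 1 := by
      constructor
      · intro h
        have hdvd : ((n : Nat) : Int) ∣ ((a * b : Nat) : Int) := Int.dvd_of_emod_eq_zero h
        have h1 : n ∣ a * b := by exact_mod_cast hdvd
        have h2 := (div_gcd_eq_one_iff (a * b) n hnpos).mpr h1
        exact_mod_cast h2
      · intro h
        have h1 : n / (a * b).gcd n = 1 := by exact_mod_cast h
        have h2 := (div_gcd_eq_one_iff (a * b) n hnpos).mp h1
        exact Int.emod_eq_zero_of_dvd (by exact_mod_cast h2)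
    -- unfold one step of each loop
    simp only [findLoop, phase1, phase2]
    rw [hacc, hv, ← hb, hmval, hmupd]
    by_cases hz : ((a * b : Nat) : Int) % n = 0
    · rw [if_pos hz, if_pos (hiff.mp hz)]
    · rw [if_neg hz, if_neg (fun h => hz (hiff.mpr h))]
      have hrec := ih (((a * b : Nat) : Int) % n) ((a * b : Nat) : Int) n hp (by positivity)
        (by rw [pmod_eq _ _ hp, pmod_eq _ _ hp, Int.emod_emod_of_dvd _ dvd_rfl])
      rw [Int.gcd_natCast_natCast, ← Int.natCast_div] at hrec
      exact hrec

theorem find_eq_alt : ∀ (p : Int), find p = find_alt p := by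
  intro p
  by_cases hp : p ≤ 0
  · simp [find, find_alt, PySem.List.pyRange_one_eq_nil hp, findLoop, phase1, phase2]
  · unfold find find_alt
    have h := joint (PySem.List.pyRange 0 p 1) 1 1 p (by omega) (by omega) rfl
    rw [show ((Int.gcd 1 p : Nat) : Int) = 1 by rw [Int.one_gcd]; rfl, Int.ediv_one] at h
    exact h

-- ===== VERDICT (by name: the statement is the Claim_ definition above) =====
theorem find_spec : Claim_equal_find := by
  intro p _
  unfold Spec_find
  exact find_eq_alt p
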